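-- pv_equiv track=rewrite | github.com/AndreeaSofia/Information-Engineering-BEng | Semester 1/Computer Programming and Programming Languages/Labs/Week 2/exercise_12.py | check_if_numbers_have_same_digits_in_base_two
-- ===== SOURCE A (Python) =====
-- def check_if_numbers_have_same_digits_in_base_two(num1, num2):
--     str_num1 = str(num1) # Convert the first number to a string
--     str_num2 = str(num2) # Convert the second number to a string
--
--     count1 = {} # Dictionary to count the occurrences of each digit in num1
--     count2 = {} # Dictionary to count the occurrences of each digit in num2
--
--     # Count the frequency of each digit in the first number
--     for digit in str_num1:
--         count1[digit] = count1.get(digit, 0) + 1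
--
--     # Count the frequency of each digit in the second number
--     for digit in str_num2:
--         count2[digit] = count2.get(digit, 0) + 1
--
--     # Return True if both numbers have the same digits with the same frequency
--     return count1 == count2
-- ===== SOURCE B (Python) =====
-- def check_if_numbers_have_same_digits_in_base_two(num1, num2):
--     return sorted(str(num1)) == sorted(str(num2))
-- ===== Notes on version B (the rewrite author's own statement) =====
-- stated objective: simpler
-- what changed: Replaces the two frequency-dictionary loops and dict comparison with a single comparison of the sorted character lists of the two numbers' string forms (multiset check by sorting instead of hash counting).
import Mathlib
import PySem

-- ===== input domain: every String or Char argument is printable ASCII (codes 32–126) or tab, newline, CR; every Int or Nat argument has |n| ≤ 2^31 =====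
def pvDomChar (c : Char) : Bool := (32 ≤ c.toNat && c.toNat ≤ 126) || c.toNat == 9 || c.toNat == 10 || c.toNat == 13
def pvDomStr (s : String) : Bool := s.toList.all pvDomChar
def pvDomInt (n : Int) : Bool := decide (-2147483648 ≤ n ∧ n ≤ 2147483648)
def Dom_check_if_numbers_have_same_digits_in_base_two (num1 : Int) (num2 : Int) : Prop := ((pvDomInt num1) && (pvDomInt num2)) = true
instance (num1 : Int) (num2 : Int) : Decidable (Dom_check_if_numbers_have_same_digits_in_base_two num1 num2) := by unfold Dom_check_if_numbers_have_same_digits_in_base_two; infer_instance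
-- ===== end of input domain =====

-- B replaces the two frequency-dictionary loops and the dict comparison with a single
-- comparison of the sorted character lists of str(num1) and str(num2) (objective: simpler).

-- ===== PORT A =====
-- Python's dict == ignores insertion order: ported as keys-as-a-set equality plus agreement of every lookup.
def check_if_numbers_have_same_digits_in_base_two (num1 : Int) (num2 : Int) : Bool :=
  let str_num1 := (PySem.Int.toStr num1).toList
  let str_num2 := (PySem.Int.toStr num2).toList
  let count1 : PySem.Dict Char Int :=
    str_num1.foldl (fun d digit => d.insert digit (d.getD digit 0 + 1)) PySem.Dict.empty
  let count2 : PySem.Dict Char Int :=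
    str_num2.foldl (fun d digit => d.insert digit (d.getD digit 0 + 1)) PySem.Dict.empty
  PySem.Set.equal count1.keys count2.keys &&
    count1.keys.all (fun k => count1.get? k == count2.get? k)

-- ===== PORT B =====
def check_if_numbers_have_same_digits_in_base_two_alt (num1 : Int) (num2 : Int) : Bool :=
  PySem.List.sorted (PySem.Int.toStr num1).toList (fun x => x) false ==
    PySem.List.sorted (PySem.Int.toStr num2).toList (fun x => x) false

-- ===== PRECONDITION & SPEC =====
def Spec_check_if_numbers_have_same_digits_in_base_two (num1 : Int) (num2 : Int) (out : Bool) : Prop := out = check_if_numbers_have_same_digits_in_base_two_alt num1 num2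
instance (num1 : Int) (num2 : Int) (out : Bool) : Decidable (Spec_check_if_numbers_have_same_digits_in_base_two num1 num2 out) := by unfold Spec_check_if_numbers_have_same_digits_in_base_two; infer_instance

-- ===== CLAIM (what is proved, stated in full; the proofs are below) =====
def Claim_equal_check_if_numbers_have_same_digits_in_base_two : Prop := ∀ (num1 : Int) (num2 : Int), Dom_check_if_numbers_have_same_digits_in_base_two num1 num2 → Spec_check_if_numbers_have_same_digits_in_base_two num1 num2 (check_if_numbers_have_same_digits_in_base_two num1 num2)

-- ===== LEMMAS AND PROOFS =====

-- lookup in a counter at a key that occurs in the counted list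
theorem counter_get?_of_mem {xs : List Char} {k : Char} (h : k ∈ xs) :
    (PySem.Dict.counter xs).get? k = some (xs.count k : Int) := by
  refine PySem.Dict.get?_of_mem_items _ ?_ (PySem.Dict.nodup_keys_counter xs)
  rw [PySem.Dict.items_counter]
  exact List.mem_map.2 ⟨k, (PySem.Set.mem_ofList xs k).2 h, rfl⟩

-- the counting loop compared as a Python dict decides multiset equality of the two lists
theorem dict_compare_iff_perm (xs ys : List Char) :
    (PySem.Set.equal (PySem.Dict.counter xs).keys (PySem.Dict.counter ys).keys &&
      (PySem.Dict.counter xs).keys.all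
        (fun k => (PySem.Dict.counter xs).get? k == (PySem.Dict.counter ys).get? k)) = true
      ↔ xs.Perm ys := by
  rw [Bool.and_eq_true, PySem.Set.equal_iff, List.all_eq_true]
  simp only [PySem.Dict.keys_counter, PySem.Set.mem_ofList]
  constructor
  · rintro ⟨hkeys, hvals⟩
    rw [List.perm_iff_count]
    intro a
    by_cases ha : a ∈ xs
    · have hb : a ∈ ys := (hkeys a).1 ha
      have := hvals a ha
      rw [counter_get?_of_mem ha, counter_get?_of_mem hb, beq_iff_eq] at this
      exact_mod_cast Option.some.inj this
    · have hb : a ∉ ys := fun h => ha ((hkeys a).2 h)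
      rw [List.count_eq_zero_of_not_mem ha, List.count_eq_zero_of_not_mem hb]
  · intro hp
    refine ⟨fun a => ⟨fun h => hp.mem_iff.1 h, fun h => hp.mem_iff.2 h⟩, fun a ha => ?_⟩
    have hb : a ∈ ys := hp.mem_iff.1 ha
    rw [counter_get?_of_mem ha, counter_get?_of_mem hb, beq_iff_eq,
      hp.count_eq a]

-- ===== VERDICT (by name: the statement is the Claim_ definition above) =====
theorem check_if_numbers_have_same_digits_in_base_two_spec : Claim_equal_check_if_numbers_have_same_digits_in_base_two := by
  intro num1 num2 _
  unfold Spec_check_if_numbers_have_same_digits_in_base_two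
  unfold check_if_numbers_have_same_digits_in_base_two check_if_numbers_have_same_digits_in_base_two_alt
  simp only [PySem.Dict.foldl_insert_getD_add_one_eq_counter]
  rw [Bool.eq_iff_iff, dict_compare_iff_perm, beq_iff_eq,
    PySem.List.sorted_id_eq_sorted_id_iff_perm]
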